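-- pv_equiv track=rewrite | github.com/Sigmanificient/codewars | src/python/katas/py5kyu/find_the_most_adjacent_integers_of_the_same_value_in_a_grid.py | find_most_adjacent
-- ===== SOURCE A (Python) =====
-- def flood(grid, x, y, target) -> int:
--     if x < 0 or x >= len(grid[0]):
--         return 0
--     if y < 0 or y >= len(grid):
--         return 0
--     if grid[y][x] != target:
--         return 0
--
--     grid[y][x] = -1
--     return 1 + sum(
--         flood(grid, x + dx, y + dy, target)
--         for dx, dy in ((-1,0), (1,0), (0,-1), (0,1))
--     )
--
-- def find_most_adjacent(grid):
--     bv, bc = (-1, 0)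
--
--     for y, line in enumerate(grid):
--         for x, cell in enumerate(line):
--             if cell == -1:
--                 continue
--
--             count = flood(grid, x, y, cell)
--             if count > bc:
--                 bv, bc = (cell, count)
--             elif count == bc and cell < bv:
--                 bv = cell
--
--     return bv, bc
-- ===== SOURCE B (Python) =====
-- def flood_iter(grid, x, y, target):
--     width = len(grid[0])
--     count = 0
--     stack = [(x, y)]
--     while stack:
--         cx, cy = stack.pop()
--         if 0 <= cx < width and 0 <= cy < len(grid) and grid[cy][cx] == target:
--             grid[cy][cx] = -1
--             count += 1
--             stack.extend(((cx, cy + 1), (cx, cy - 1), (cx + 1, cy), (cx - 1, cy)))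
--     return count
--
-- def find_most_adjacent(grid):
--     bv, bc = (-1, 0)
--
--     for y, line in enumerate(grid):
--         for x, cell in enumerate(line):
--             if cell == -1:
--                 continue
--
--             count = flood_iter(grid, x, y, cell)
--             if count > bc:
--                 bv, bc = (cell, count)
--             elif count == bc and cell < bv:
--                 bv = cell
--
--     return bv, bc
-- ===== Notes on version B (the rewrite author's own statement) =====
-- stated objective: idiomatic
-- what changed: the recursive flood fill is replaced by an iterative flood fill with an explicit stack (pop a cell, test bounds and value, mark it -1, push the four neighbours), avoiding deep recursion; the outer scan and tie-break are unchanged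
-- outside the precondition, e.g. on find_most_adjacent([[-1], []]): A returns (-1, 0), B returns (-1, 0)
import Mathlib
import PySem

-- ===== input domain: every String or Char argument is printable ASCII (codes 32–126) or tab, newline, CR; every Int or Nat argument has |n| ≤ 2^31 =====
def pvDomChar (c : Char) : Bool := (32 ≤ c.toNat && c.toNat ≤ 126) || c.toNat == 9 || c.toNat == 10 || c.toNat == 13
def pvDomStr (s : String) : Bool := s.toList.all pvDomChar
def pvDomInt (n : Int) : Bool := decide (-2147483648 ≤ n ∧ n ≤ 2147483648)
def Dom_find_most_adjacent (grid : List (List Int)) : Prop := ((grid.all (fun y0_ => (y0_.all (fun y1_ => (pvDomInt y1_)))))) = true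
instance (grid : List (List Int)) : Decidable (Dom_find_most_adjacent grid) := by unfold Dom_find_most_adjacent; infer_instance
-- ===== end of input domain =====

-- B replaces A's recursive flood fill by an iterative flood fill over an explicit stack; the
-- outer scan and tie-break are unchanged.  Both Pythons mutate `grid` in place identically
-- (every counted cell becomes -1); the theorems below are about the RETURN value.

-- ===== PORT A =====

-- number of cells ≠ -1; used only as a fuel bound making the ports total
def pvMu (g : List (List Int)) : Nat := (g.map (fun r => (r.filter (fun c => decide (c ≠ -1))).length)).sum

-- grid[y][x] = -1  (row y, position x; out-of-range indices leave the grid unchanged, unreachable inside Pre_)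
def pvMark : List (List Int) → Nat → Nat → List (List Int)
  | [], _, _ => []
  | r :: g, 0, x => r.set x (-1) :: g
  | r :: g, y + 1, x => r :: pvMark g y x

-- recursive flood of A; `fuel` is a totality guard only (pvMu g + 1 is always enough inside Pre_);
-- `getD … 0` is exact inside Pre_, where every access is in range
def pvFloodA (fuel : Nat) (g : List (List Int)) (x y target : Int) : Int × List (List Int) :=
  match fuel with
  | 0 => (0, g)
  | fuel + 1 =>
    if x < 0 ∨ ((g.headD []).length : Int) ≤ x then (0, g)
    else if y < 0 ∨ (g.length : Int) ≤ y then (0, g)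
    else if (g.getD y.toNat []).getD x.toNat 0 ≠ target then (0, g)
    else
      let g0 := pvMark g y.toNat x.toNat
      let r1 := pvFloodA fuel g0 (x - 1) y target
      let r2 := pvFloodA fuel r1.2 (x + 1) y target
      let r3 := pvFloodA fuel r2.2 x (y - 1) target
      let r4 := pvFloodA fuel r3.2 x (y + 1) target
      (1 + (r1.1 + r2.1 + r3.1 + r4.1), r4.2)

-- inner loop `for x, cell in enumerate(line)` (n = cells left; cells are read from the live grid)
def pvCellsA (g : List (List Int)) (y x : Nat) (n : Nat) (bv bc : Int) : (Int × Int) × List (List Int) :=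
  match n with
  | 0 => ((bv, bc), g)
  | n + 1 =>
    let cell := (g.getD y []).getD x 0
    if cell = -1 then pvCellsA g y (x + 1) n bv bc
    else
      let r := pvFloodA (pvMu g + 1) g (x : Int) (y : Int) cell
      if r.1 > bc then pvCellsA r.2 y (x + 1) n cell r.1
      else if r.1 = bc ∧ cell < bv then pvCellsA r.2 y (x + 1) n cell bc
      else pvCellsA r.2 y (x + 1) n bv bc

-- outer loop `for y, line in enumerate(grid)`
def pvRowsA (g : List (List Int)) (y : Nat) (m : Nat) (bv bc : Int) : (Int × Int) × List (List Int) :=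
  match m with
  | 0 => ((bv, bc), g)
  | m + 1 =>
    let r := pvCellsA g y 0 ((g.getD y []).length) bv bc
    pvRowsA r.2 (y + 1) m r.1.1 r.1.2

def find_most_adjacent (grid : List (List Int)) : Int × Int :=
  (pvRowsA grid 0 grid.length (-1) 0).1

-- ===== PORT B =====

-- iterative flood of B: pop a cell, test bounds and value, mark it -1, push the four neighbours
-- (pushed so that the pop order is left, right, up, down); `fuel` is a totality guard only
def pvStackB (fuel : Nat) (w : Nat) (target : Int) (g : List (List Int)) (stk : List (Int × Int)) : Int × List (List Int) :=
  match stk with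
  | [] => (0, g)
  | (cx, cy) :: s =>
    if 0 ≤ cx ∧ cx < (w : Int) ∧ 0 ≤ cy ∧ cy < (g.length : Int) ∧ (g.getD cy.toNat []).getD cx.toNat 0 = target then
      match fuel with
      | 0 => (0, g)  -- fuel exhausted: unreachable at the fuel pvFloodB passes
      | fuel + 1 =>
        let g' := pvMark g cy.toNat cx.toNat
        let r := pvStackB fuel w target g' ((cx - 1, cy) :: (cx + 1, cy) :: (cx, cy - 1) :: (cx, cy + 1) :: s)
        (1 + r.1, r.2)
    else pvStackB fuel w target g s
termination_by (fuel, stk.length)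

def pvFloodB (g : List (List Int)) (x y target : Int) : Int × List (List Int) :=
  pvStackB (pvMu g + 1) ((g.headD []).length) target g [(x, y)]

def pvCellsB (g : List (List Int)) (y x : Nat) (n : Nat) (bv bc : Int) : (Int × Int) × List (List Int) :=
  match n with
  | 0 => ((bv, bc), g)
  | n + 1 =>
    let cell := (g.getD y []).getD x 0
    if cell = -1 then pvCellsB g y (x + 1) n bv bc
    else
      let r := pvFloodB g (x : Int) (y : Int) cell
      if r.1 > bc then pvCellsB r.2 y (x + 1) n cell r.1
      else if r.1 = bc ∧ cell < bv then pvCellsB r.2 y (x + 1) n cell bc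
      else pvCellsB r.2 y (x + 1) n bv bc

def pvRowsB (g : List (List Int)) (y : Nat) (m : Nat) (bv bc : Int) : (Int × Int) × List (List Int) :=
  match m with
  | 0 => ((bv, bc), g)
  | m + 1 =>
    let r := pvCellsB g y 0 ((g.getD y []).length) bv bc
    pvRowsB r.2 (y + 1) m r.1.1 r.1.2

def find_most_adjacent_alt (grid : List (List Int)) : Int × Int :=
  (pvRowsB grid 0 grid.length (-1) 0).1

-- ===== PRECONDITION & SPEC =====
-- Pre_ excludes grids having a row shorter than the first row: there A's flood (and B's) almost
-- always raises IndexError when it probes a missing cell of a short row, and on the rare such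
-- grids with no floodable cell at all both programs still return (-1, 0) alike.
def Pre_find_most_adjacent (grid : List (List Int)) : Prop :=
  ∀ row ∈ grid, (grid.headD []).length ≤ row.length
instance (grid : List (List Int)) : Decidable (Pre_find_most_adjacent grid) := by
  unfold Pre_find_most_adjacent; infer_instance

def pvWitness_find_most_adjacent : List (List Int) := [[1, 1], [2, 2]]

def Spec_find_most_adjacent (grid : List (List Int)) (out : Int × Int) : Prop := out = find_most_adjacent_alt grid
instance (grid : List (List Int)) (out : Int × Int) : Decidable (Spec_find_most_adjacent grid out) := by unfold Spec_find_most_adjacent; infer_instance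

-- ===== CLAIM (what is proved, stated in full; the proofs are below) =====
def Claim_equal_find_most_adjacent : Prop := ∀ (grid : List (List Int)), Dom_find_most_adjacent grid → Pre_find_most_adjacent grid → Spec_find_most_adjacent grid (find_most_adjacent grid)

-- ===== LEMMAS AND PROOFS =====

-- row lengths are invariant under marking
theorem rowLens_mark (g : List (List Int)) (y x : Nat) :
    (pvMark g y x).map List.length = g.map List.length := by
  induction g generalizing y with
  | nil => rfl
  | cons r g ih =>
    cases y with
    | zero => simp [pvMark]
    | succ y => simp [pvMark, ih]

theorem pre_of_rowLens {g1 g2 : List (List Int)}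
    (h : g1.map List.length = g2.map List.length) :
    Pre_find_most_adjacent g1 → Pre_find_most_adjacent g2 := by
  intro hp row hr
  have hh : (g2.headD []).length = (g1.headD []).length := by
    cases g1 with
    | nil => cases g2 <;> simp_all
    | cons a g1 => cases g2 <;> simp_all
  have hm : row.length ∈ g1.map List.length := by
    rw [h]; exact List.mem_map_of_mem hr
  obtain ⟨r1, hr1, hlen⟩ := List.mem_map.1 hm
  rw [hh, ← hlen]
  exact hp r1 hr1

-- setting a cell to -1 never increases the count of non-(-1) cells …
theorem filterSet_le (r : List Int) (x : Nat) :
    ((r.set x (-1)).filter (fun c => decide (c ≠ -1))).length ≤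
      (r.filter (fun c => decide (c ≠ -1))).length := by
  induction r generalizing x with
  | nil => simp
  | cons a r ih =>
    cases x with
    | zero =>
      by_cases h : a = -1 <;> simp [h]
    | succ x =>
      have := ih x
      simp only [ne_eq, decide_not] at this
      by_cases h : a = -1 <;> simp [h] <;> omega

-- … and strictly decreases it when the old in-range value is not -1
theorem filterSet_lt (r : List Int) (x : Nat) (hx : x < r.length) (hv : r.getD x 0 ≠ -1) :
    ((r.set x (-1)).filter (fun c => decide (c ≠ -1))).length <
      (r.filter (fun c => decide (c ≠ -1))).length := by
  induction r generalizing x with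
  | nil => exact absurd hx (by simp)
  | cons a r ih =>
    cases x with
    | zero =>
      simp at hv
      simp [hv]
    | succ x =>
      simp at hx hv
      have := ih x hx hv
      simp only [ne_eq, decide_not] at this
      by_cases h : a = -1 <;> simp [h] <;> omega

theorem pvMu_cons (r : List Int) (g : List (List Int)) :
    pvMu (r :: g) = (r.filter (fun c => decide (c ≠ -1))).length + pvMu g := by
  simp [pvMu]

theorem mu_mark_le (g : List (List Int)) (y x : Nat) : pvMu (pvMark g y x) ≤ pvMu g := by
  induction g generalizing y with
  | nil => simp [pvMark]
  | cons r g ih =>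
    cases y with
    | zero =>
      simp only [pvMark, pvMu_cons]
      have := filterSet_le r x
      omega
    | succ y =>
      simp only [pvMark, pvMu_cons]
      have := ih y
      omega

theorem mu_mark_lt (g : List (List Int)) (y x : Nat) (hy : y < g.length)
    (hx : x < (g.getD y []).length) (hv : (g.getD y []).getD x 0 ≠ -1) :
    pvMu (pvMark g y x) < pvMu g := by
  induction g generalizing y with
  | nil => exact absurd hy (by simp)
  | cons r g ih =>
    cases y with
    | zero =>
      simp only [List.getD_cons_zero] at hx hv
      simp only [pvMark, pvMu_cons]
      have := filterSet_lt r x hx hv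
      omega
    | succ y =>
      simp only [List.getD_cons_succ] at hx hv
      simp only [List.length_cons, Nat.succ_lt_succ_iff] at hy
      simp only [pvMark, pvMu_cons]
      have := ih y hy hx hv
      omega

theorem rowLens_floodA (fuel : Nat) (g : List (List Int)) (x y t : Int) :
    (pvFloodA fuel g x y t).2.map List.length = g.map List.length := by
  fun_induction pvFloodA fuel g x y t with
  | case1 => rfl
  | case2 => rfl
  | case3 => rfl
  | case4 => rfl
  | case5 g x y fuel h1 h2 h3 g0 r1 r2 r3 r4 ih1 ih2 ih3 ih4 =>
    show List.map List.length r4.2 = List.map List.length g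
    rw [show r4 = pvFloodA fuel r3.2 x (y + 1) t from rfl, ih4,
        show r3 = pvFloodA fuel r2.2 x (y - 1) t from rfl, ih3,
        show r2 = pvFloodA fuel r1.2 (x + 1) y t from rfl, ih2,
        show r1 = pvFloodA fuel g0 (x - 1) y t from rfl, ih1,
        show g0 = pvMark g y.toNat x.toNat from rfl, rowLens_mark]

theorem mu_floodA_le (fuel : Nat) (g : List (List Int)) (x y t : Int) :
    pvMu (pvFloodA fuel g x y t).2 ≤ pvMu g := by
  fun_induction pvFloodA fuel g x y t with
  | case1 => simp
  | case2 => simp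
  | case3 => simp
  | case4 => simp
  | case5 g x y fuel h1 h2 h3 g0 r1 r2 r3 r4 ih1 ih2 ih3 ih4 =>
    show pvMu r4.2 ≤ pvMu g
    have m0 : pvMu g0 ≤ pvMu g := mu_mark_le g y.toNat x.toNat
    have m1 : pvMu r1.2 ≤ pvMu g0 := ih1
    have m2 : pvMu r2.2 ≤ pvMu r1.2 := ih2
    have m3 : pvMu r3.2 ≤ pvMu r2.2 := ih3
    have m4 : pvMu r4.2 ≤ pvMu r3.2 := ih4
    omega

theorem headLen_of_rowLens {g1 g2 : List (List Int)}
    (h : g1.map List.length = g2.map List.length) :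
    (g1.headD []).length = (g2.headD []).length := by
  cases g1 with
  | nil => cases g2 <;> simp_all
  | cons a g1 => cases g2 <;> simp_all

theorem wbound_of_rowLens {w : Nat} {g1 g2 : List (List Int)}
    (h : g1.map List.length = g2.map List.length)
    (hw : ∀ r ∈ g2, w ≤ r.length) : ∀ r ∈ g1, w ≤ r.length := by
  intro r hr
  have hm : r.length ∈ g2.map List.length := by rw [← h]; exact List.mem_map_of_mem hr
  obtain ⟨r2, hr2, hlen⟩ := List.mem_map.1 hm
  rw [← hlen]
  exact hw r2 hr2

theorem row_mem (g : List (List Int)) (n : Nat) (hn : n < g.length) : g.getD n [] ∈ g := by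
  rw [List.getD_eq_getElem g [] hn]
  exact List.getElem_mem hn

-- marking the popped cell strictly decreases pvMu (all hit-branch facts bundled)
theorem mu_hit_lt (w : Nat) (t : Int) (g : List (List Int)) (cx cy : Int)
    (ht : t ≠ -1) (hw : ∀ r ∈ g, w ≤ r.length)
    (h : 0 ≤ cx ∧ cx < (w : Int) ∧ 0 ≤ cy ∧ cy < (g.length : Int) ∧
         (g.getD cy.toNat []).getD cx.toNat 0 = t) :
    pvMu (pvMark g cy.toNat cx.toNat) < pvMu g := by
  obtain ⟨hx0, hxw, hy0, hyl, hcell⟩ := h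
  have hy : cy.toNat < g.length := by omega
  have hxn : cx.toNat < w := by omega
  have hxr : cx.toNat < (g.getD cy.toNat []).length :=
    lt_of_lt_of_le hxn (hw _ (row_mem g cy.toNat hy))
  exact mu_mark_lt g cy.toNat cx.toNat hy hxr (by rw [hcell]; exact ht)

-- above the threshold pvMu g the fuel of the stack loop is irrelevant
theorem stackB_stable (w : Nat) (t : Int) (f1 : Nat) (g : List (List Int)) (stk : List (Int × Int)) :
    ∀ f2 : Nat, t ≠ -1 → (∀ r ∈ g, w ≤ r.length) → pvMu g < f1 → pvMu g < f2 →
      pvStackB f1 w t g stk = pvStackB f2 w t g stk := by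
  fun_induction pvStackB f1 w t g stk with
  | case1 =>
    intro f2 _ _ _ _
    rw [pvStackB]
  | case2 =>
    intro _ _ _ hf _
    exact absurd hf (by omega)
  | case3 g cx cy s h fuel g' r ih =>
    intro f2 ht hw hf1 hf2
    have hlt : pvMu g' < pvMu g := mu_hit_lt w t g cx cy ht hw h
    have hw' : ∀ r ∈ g', w ≤ r.length := wbound_of_rowLens (rowLens_mark g cy.toNat cx.toNat) hw
    cases f2 with
    | zero => exact absurd hf2 (by omega)
    | succ f2 =>
      conv_rhs => rw [pvStackB]
      rw [if_pos h]
      show _ = (1 + (pvStackB f2 w t g' ((cx - 1, cy) :: (cx + 1, cy) :: (cx, cy - 1) :: (cx, cy + 1) :: s)).1,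
                (pvStackB f2 w t g' ((cx - 1, cy) :: (cx + 1, cy) :: (cx, cy - 1) :: (cx, cy + 1) :: s)).2)
      rw [show r = pvStackB fuel w t g' ((cx - 1, cy) :: (cx + 1, cy) :: (cx, cy - 1) :: (cx, cy + 1) :: s) from rfl,
          ih f2 ht hw' (by omega) (by omega)]
  | case4 fuel g cx cy s h ih =>
    intro f2 ht hw hf1 hf2
    rw [ih f2 ht hw hf1 hf2]
    conv_rhs => rw [pvStackB.eq_def]
    simp only [if_neg h]

-- the stack loop processes the top cell exactly as one recursive flood call, then the rest
theorem stackB_eq_floodA (f : Nat) (g : List (List Int)) (x y t : Int) :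
    ∀ (w : Nat) (s : List (Int × Int)), t ≠ -1 → w = (g.headD []).length →
      (∀ r ∈ g, w ≤ r.length) → pvMu g < f →
      pvStackB f w t g ((x, y) :: s) =
        ((pvFloodA f g x y t).1 + (pvStackB f w t (pvFloodA f g x y t).2 s).1,
         (pvStackB f w t (pvFloodA f g x y t).2 s).2) := by
  fun_induction pvFloodA f g x y t with
  | case1 g x y =>
    intro w s ht hwEq hw hf
    exact absurd hf (by omega)
  | case2 g x y fuel h1 =>
    intro w s ht hwEq hw hf
    have hcond : ¬(0 ≤ x ∧ x < (w : Int) ∧ 0 ≤ y ∧ y < (g.length : Int) ∧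
        (g.getD y.toNat []).getD x.toNat 0 = t) := by
      subst hwEq
      rintro ⟨c1, c2, -⟩
      rcases h1 with h1 | h1 <;> omega
    conv_lhs => rw [pvStackB.eq_def]
    simp only [if_neg hcond]
    rw [Prod.mk.injEq]
    exact ⟨by omega, rfl⟩
  | case3 g x y fuel h1 h2 =>
    intro w s ht hwEq hw hf
    have hcond : ¬(0 ≤ x ∧ x < (w : Int) ∧ 0 ≤ y ∧ y < (g.length : Int) ∧
        (g.getD y.toNat []).getD x.toNat 0 = t) := by
      rintro ⟨-, -, c3, c4, -⟩
      rcases h2 with h2 | h2 <;> omega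
    conv_lhs => rw [pvStackB.eq_def]
    simp only [if_neg hcond]
    rw [Prod.mk.injEq]
    exact ⟨by omega, rfl⟩
  | case4 g x y fuel h1 h2 h3 =>
    intro w s ht hwEq hw hf
    have hcond : ¬(0 ≤ x ∧ x < (w : Int) ∧ 0 ≤ y ∧ y < (g.length : Int) ∧
        (g.getD y.toNat []).getD x.toNat 0 = t) := by
      rintro ⟨-, -, -, -, c5⟩
      exact h3 c5
    conv_lhs => rw [pvStackB.eq_def]
    simp only [if_neg hcond]
    rw [Prod.mk.injEq]
    exact ⟨by omega, rfl⟩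
  | case5 g x y fuel h1 h2 h3 g0 r1 r2 r3 r4 ih1 ih2 ih3 ih4 =>
    intro w s ht hwEq hw hf
    have hcell : (g.getD y.toNat []).getD x.toNat 0 = t := not_not.1 h3
    have hcond : 0 ≤ x ∧ x < (w : Int) ∧ 0 ≤ y ∧ y < (g.length : Int) ∧
        (g.getD y.toNat []).getD x.toNat 0 = t := by
      subst hwEq
      refine ⟨by omega, by omega, by omega, by omega, hcell⟩
    -- facts about the marked grid
    have hL0 := rowLens_mark g y.toNat x.toNat
    have hg0 : pvMark g y.toNat x.toNat = g0 := rfl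
    have hmu0 : pvMu g0 < fuel := by
      have := mu_hit_lt w t g x y ht hw hcond
      rw [hg0] at this
      omega
    have hwEq0 : w = (g0.headD []).length := by
      rw [hwEq, ← headLen_of_rowLens (hg0 ▸ hL0)]
    have hw0 : ∀ r ∈ g0, w ≤ r.length := wbound_of_rowLens (hg0 ▸ hL0) hw
    -- facts after each recursive flood
    have hL1 : r1.2.map List.length = g0.map List.length := rowLens_floodA fuel g0 (x - 1) y t
    have hmu1 : pvMu r1.2 < fuel := lt_of_le_of_lt (mu_floodA_le fuel g0 (x - 1) y t) hmu0
    have hwEq1 : w = (r1.2.headD []).length := by rw [hwEq0, ← headLen_of_rowLens hL1]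
    have hw1 : ∀ r ∈ r1.2, w ≤ r.length := wbound_of_rowLens hL1 hw0
    have hL2 : r2.2.map List.length = r1.2.map List.length := rowLens_floodA fuel r1.2 (x + 1) y t
    have hmu2 : pvMu r2.2 < fuel := lt_of_le_of_lt (mu_floodA_le fuel r1.2 (x + 1) y t) hmu1
    have hwEq2 : w = (r2.2.headD []).length := by rw [hwEq1, ← headLen_of_rowLens hL2]
    have hw2 : ∀ r ∈ r2.2, w ≤ r.length := wbound_of_rowLens hL2 hw1
    have hL3 : r3.2.map List.length = r2.2.map List.length := rowLens_floodA fuel r2.2 x (y - 1) t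
    have hmu3 : pvMu r3.2 < fuel := lt_of_le_of_lt (mu_floodA_le fuel r2.2 x (y - 1) t) hmu2
    have hwEq3 : w = (r3.2.headD []).length := by rw [hwEq2, ← headLen_of_rowLens hL3]
    have hw3 : ∀ r ∈ r3.2, w ≤ r.length := wbound_of_rowLens hL3 hw2
    have hL4 : r4.2.map List.length = r3.2.map List.length := rowLens_floodA fuel r3.2 x (y + 1) t
    have hmu4 : pvMu r4.2 < fuel := lt_of_le_of_lt (mu_floodA_le fuel r3.2 x (y + 1) t) hmu3
    have hw4 : ∀ r ∈ r4.2, w ≤ r.length := wbound_of_rowLens hL4 hw3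
    -- unfold one iteration of the stack loop
    conv_lhs => rw [pvStackB.eq_def]
    simp only [if_pos hcond]
    rw [hg0,
        ih1 w ((x + 1, y) :: (x, y - 1) :: (x, y + 1) :: s) ht hwEq0 hw0 hmu0,
        show pvFloodA fuel g0 (x - 1) y t = r1 from rfl,
        ih2 w ((x, y - 1) :: (x, y + 1) :: s) ht hwEq1 hw1 hmu1,
        show pvFloodA fuel r1.2 (x + 1) y t = r2 from rfl,
        ih3 w ((x, y + 1) :: s) ht hwEq2 hw2 hmu2,
        show pvFloodA fuel r2.2 x (y - 1) t = r3 from rfl,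
        ih4 w s ht hwEq3 hw3 hmu3,
        show pvFloodA fuel r3.2 x (y + 1) t = r4 from rfl,
        stackB_stable w t fuel r4.2 s (fuel + 1) ht hw4 hmu4 (by omega)]
    simp only [Nat.succ_eq_add_one, Prod.mk.injEq]
    simp only [Prod.ext_iff] at *
    simp
    omega

theorem floodB_eq_floodA (g : List (List Int)) (x y t : Int) (ht : t ≠ -1)
    (hp : Pre_find_most_adjacent g) :
    pvFloodB g x y t = pvFloodA (pvMu g + 1) g x y t := by
  unfold pvFloodB
  rw [stackB_eq_floodA (pvMu g + 1) g x y t ((g.headD []).length) [] ht rfl hp (by omega)]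
  rw [pvStackB]
  simp

theorem rowLens_cellsA (n : Nat) (g : List (List Int)) (y x : Nat) (bv bc : Int) :
    (pvCellsA g y x n bv bc).2.map List.length = g.map List.length := by
  induction n generalizing g x bv bc with
  | zero => rfl
  | succ n ih =>
    simp only [pvCellsA]
    split_ifs with h1 h2 h3
    · exact ih g (x + 1) bv bc
    · rw [ih, rowLens_floodA]
    · rw [ih, rowLens_floodA]
    · rw [ih, rowLens_floodA]

theorem cellsB_eq_cellsA (n : Nat) (g : List (List Int)) (y x : Nat) (bv bc : Int)
    (hp : Pre_find_most_adjacent g) :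
    pvCellsB g y x n bv bc = pvCellsA g y x n bv bc := by
  induction n generalizing g x bv bc with
  | zero => rfl
  | succ n ih =>
    simp only [pvCellsA, pvCellsB]
    by_cases h1 : (g.getD y []).getD x 0 = -1
    · simp only [if_pos h1]
      exact ih g (x + 1) bv bc hp
    · simp only [if_neg h1]
      rw [floodB_eq_floodA g (x : Int) (y : Int) ((g.getD y []).getD x 0) h1 hp]
      have hp' : Pre_find_most_adjacent (pvFloodA (pvMu g + 1) g (x : Int) (y : Int) ((g.getD y []).getD x 0)).2 :=
        pre_of_rowLens (rowLens_floodA (pvMu g + 1) g (x : Int) (y : Int) ((g.getD y []).getD x 0)).symm hp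
      split_ifs with h2 h3
      · exact ih _ _ _ _ hp'
      · exact ih _ _ _ _ hp'
      · exact ih _ _ _ _ hp' 

theorem rowsB_eq_rowsA (m : Nat) (g : List (List Int)) (y : Nat) (bv bc : Int)
    (hp : Pre_find_most_adjacent g) :
    pvRowsB g y m bv bc = pvRowsA g y m bv bc := by
  induction m generalizing g y bv bc with
  | zero => rfl
  | succ m ih =>
    simp only [pvRowsA, pvRowsB]
    rw [cellsB_eq_cellsA ((g.getD y []).length) g y 0 bv bc hp]
    exact ih _ _ _ _ (pre_of_rowLens (rowLens_cellsA _ g y 0 bv bc).symm hp)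

-- ===== VERDICT (by name: the statement is the Claim_ definition above) =====
theorem find_most_adjacent_spec : Claim_equal_find_most_adjacent := by
  intro grid _ hp
  unfold Spec_find_most_adjacent find_most_adjacent find_most_adjacent_alt
  rw [rowsB_eq_rowsA _ _ _ _ _ hp]
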